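-- pv_equiv track=rewrite | github.com/flassantos/amused | scripts/utils.py | group_events_by_tabchange_session
-- ===== SOURCE A (Python) =====
-- def group_events_by_tabchange_session(selected_events):
--     """
--     Group events by tabchange events. Each group is a list of events that are bounded by tabchange events.
--     This will create the structure of an episode, where each episode is a list of events.
--     """
--     new_selected_events = []
--     inner_event = []
--     for event in selected_events:
--         inner_event.append(event)
--         if event['evt'] == 'tabchange':
--             new_selected_events.append(inner_event)
--             inner_event = []
--     if len(inner_event) > 0:
--         new_selected_events.append(inner_event)
--     assert len(selected_events) == sum(map(len, new_selected_events))
--     return new_selected_events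
-- ===== SOURCE B (Python) =====
-- def group_events_by_tabchange_session(selected_events):
--     """
--     Group events by tabchange events, as two phases: first find the cut points
--     (index just after each tabchange event), then build the groups by slicing.
--     """
--     cut = [i + 1 for i, event in enumerate(selected_events) if event['evt'] == 'tabchange']
--     groups = []
--     prev = 0
--     for c in cut:
--         groups.append(selected_events[prev:c])
--         prev = c
--     if prev < len(selected_events):
--         groups.append(selected_events[prev:])
--     return groups
-- ===== Notes on version B (the rewrite author's own statement) =====
-- stated objective: alternative
-- what changed: A builds groups in one pass by accumulating a current sublist and flushing it at each tabchange; B first computes the list of cut indices (one past each tabchange) and then builds the groups by slicing the input between consecutive cut points; Pre_ excludes inputs where an event lacks the 'evt' key, on which both A and B raise KeyError.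
import Mathlib
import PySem

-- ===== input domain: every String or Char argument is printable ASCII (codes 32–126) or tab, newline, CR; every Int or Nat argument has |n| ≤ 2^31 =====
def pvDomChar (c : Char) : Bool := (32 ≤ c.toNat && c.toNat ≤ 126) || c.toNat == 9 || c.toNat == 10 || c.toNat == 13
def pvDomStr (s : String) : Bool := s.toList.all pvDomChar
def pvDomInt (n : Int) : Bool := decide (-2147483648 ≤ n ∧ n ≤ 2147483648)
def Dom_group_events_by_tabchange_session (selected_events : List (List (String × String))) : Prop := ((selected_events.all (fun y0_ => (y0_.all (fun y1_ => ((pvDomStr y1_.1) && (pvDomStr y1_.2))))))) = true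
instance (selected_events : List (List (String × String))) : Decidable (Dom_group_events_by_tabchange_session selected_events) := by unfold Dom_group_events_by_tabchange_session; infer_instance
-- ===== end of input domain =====

-- B groups by two phases (cut indices, then slices) instead of A's single accumulating pass;
-- same cost, different decomposition. Pre_ excludes events lacking the 'evt' key (KeyError in both).

-- ===== PORT A =====
-- event['evt'] is a first-match association-list lookup; the final assert of A always holds and is omitted.
def group_events_by_tabchange_session (selected_events : List (List (String × String))) : List (List (List (String × String))) :=
  let st := selected_events.foldl
    (fun (st : List (List (List (String × String))) × List (List (String × String))) event =>
      let inner := st.2 ++ [event]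
      if List.lookup "evt" event == some "tabchange" then (st.1 ++ [inner], [])
      else (st.1, inner)) ([], [])
  if 0 < st.2.length then st.1 ++ [st.2] else st.1

-- ===== PORT B =====
def group_events_by_tabchange_session_alt (selected_events : List (List (String × String))) : List (List (List (String × String))) :=
  let cut : List Int := (PySem.List.enumerate selected_events).filterMap
    (fun p => if List.lookup "evt" p.2 == some "tabchange" then some (p.1 + 1) else none)
  let st := cut.foldl
    (fun (st : List (List (List (String × String))) × Int) c =>
      (st.1 ++ [PySem.List.slice selected_events (some st.2) (some c)], c)) ([], 0)
  if st.2 < (selected_events.length : Int) then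
    st.1 ++ [PySem.List.slice selected_events (some st.2) none]
  else st.1

-- ===== PRECONDITION & SPEC =====
-- Pre_ excludes exactly the inputs on which A's event['evt'] raises KeyError (an event without the key).
def Pre_group_events_by_tabchange_session (selected_events : List (List (String × String))) : Prop :=
  ∀ e ∈ selected_events, (List.lookup "evt" e).isSome = true
instance (selected_events : List (List (String × String))) : Decidable (Pre_group_events_by_tabchange_session selected_events) := by unfold Pre_group_events_by_tabchange_session; infer_instance
def pvWitness_group_events_by_tabchange_session : (List (List (String × String))) :=
  [[("evt", "keypress")], [("evt", "tabchange")], [("evt", "click")]]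
def Spec_group_events_by_tabchange_session (selected_events : List (List (String × String))) (out : List (List (List (String × String)))) : Prop := out = group_events_by_tabchange_session_alt selected_events
instance (selected_events : List (List (String × String))) (out : List (List (List (String × String)))) : Decidable (Spec_group_events_by_tabchange_session selected_events out) := by unfold Spec_group_events_by_tabchange_session; infer_instance

-- ===== CLAIM (what is proved, stated in full; the proofs are below) =====
def Claim_equal_group_events_by_tabchange_session : Prop := ∀ (selected_events : List (List (String × String))), Dom_group_events_by_tabchange_session selected_events → Pre_group_events_by_tabchange_session selected_events → Spec_group_events_by_tabchange_session selected_events (group_events_by_tabchange_session selected_events)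

-- ===== LEMMAS AND PROOFS =====

abbrev Ev : Type := List (String × String)

def tabB (e : Ev) : Bool := List.lookup "evt" e == some "tabchange"

-- reference grouping, structural
def grF : List Ev → List (List Ev)
  | [] => []
  | e :: t =>
    if tabB e then [e] :: grF t
    else match grF t with
      | [] => [[e]]
      | g :: gs => (e :: g) :: gs

-- A's fold step and finish, named so the loop invariant can be stated without a `let`
def stepA (st : List (List Ev) × List Ev) (event : Ev) : List (List Ev) × List Ev :=
  let inner := st.2 ++ [event]
  if List.lookup "evt" event == some "tabchange" then (st.1 ++ [inner], []) else (st.1, inner)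

def finA (st : List (List Ev) × List Ev) : List (List Ev) :=
  if 0 < st.2.length then st.1 ++ [st.2] else st.1

-- B's fold step and finish
def stepB (sel : List Ev) (st : List (List Ev) × Int) (c : Int) : List (List Ev) × Int :=
  (st.1 ++ [PySem.List.slice sel (some st.2) (some c)], c)

def finB (sel : List Ev) (st : List (List Ev) × Int) : List (List Ev) :=
  if st.2 < (sel.length : Int) then st.1 ++ [PySem.List.slice sel (some st.2) none] else st.1

-- cut points of B, as naturals, starting index s
def cutN : List Ev → Nat → List Nat
  | [], _ => []
  | e :: t, s => if tabB e then (s + 1) :: cutN t (s + 1) else cutN t (s + 1)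

-- B's second phase, slices reduced to drop/take
def runB (sel : List Ev) : List Nat → Nat → List (List Ev)
  | [], p => if p < sel.length then [sel.drop p] else []
  | c :: cs, p => (sel.drop p).take (c - p) :: runB sel cs c

theorem cut_eq (sel : List Ev) (s : Nat) :
    (PySem.List.enumerate sel (s : Int)).filterMap
      (fun p => if List.lookup "evt" p.2 == some "tabchange" then some (p.1 + 1) else none)
      = (cutN sel s).map (fun n : Nat => (n : Int)) := by
  induction sel generalizing s with
  | nil => simp [PySem.List.enumerate_nil, cutN]
  | cons e t ih =>
    rw [PySem.List.enumerate_cons, List.filterMap_cons]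
    have hcast : (s : Int) + 1 = ((s + 1 : Nat) : Int) := by push_cast; ring
    by_cases h : (List.lookup "evt" e == some "tabchange") = true
    · rw [if_pos h, hcast, ih (s + 1)]
      simp [cutN, tabB, h]
    · rw [if_neg h, hcast, ih (s + 1)]
      simp [cutN, tabB, h]

theorem cutN_shift (t : List Ev) (s : Nat) :
    cutN t (s + 1) = (cutN t s).map (· + 1) := by
  induction t generalizing s with
  | nil => simp [cutN]
  | cons e t ih =>
    by_cases h : tabB e <;> simp [cutN, h, ih (s + 1)]

theorem foldB_eq (sel : List Ev) (cs : List Nat) (p : Nat) (g : List (List Ev)) :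
    finB sel ((cs.map (fun n : Nat => (n : Int))).foldl (stepB sel) (g, (p : Nat))) = g ++ runB sel cs p := by
  induction cs generalizing p g with
  | nil =>
    simp only [List.map_nil, List.foldl_nil, finB, runB]
    by_cases h : p < sel.length
    · rw [if_pos (by exact_mod_cast h), PySem.List.slice_from_natCast, if_pos h]
    · rw [if_neg (by exact_mod_cast h), if_neg h]
      simp
  | cons c cs ih =>
    simp only [List.map_cons, List.foldl_cons, stepB, PySem.List.slice_natCast]
    rw [ih c (g ++ [(sel.drop p).take (c - p)])]
    simp [runB]

theorem runB_shift (e : Ev) (t : List Ev) (cs : List Nat) (p : Nat) :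
    runB (e :: t) (cs.map (· + 1)) (p + 1) = runB t cs p := by
  induction cs generalizing p with
  | nil => simp [runB]
  | cons c cs ih => simp [runB, ih c, Nat.succ_sub_succ]

theorem alt_eq_runB (sel : List Ev) :
    group_events_by_tabchange_session_alt sel = runB sel (cutN sel 0) 0 := by
  have h0 : ((0 : Nat) : Int) = 0 := by simp
  show finB sel
    (((PySem.List.enumerate sel).filterMap
        (fun p => if List.lookup "evt" p.2 == some "tabchange" then some (p.1 + 1) else none)).foldl
      (stepB sel) ([], 0)) = runB sel (cutN sel 0) 0
  rw [show (PySem.List.enumerate sel 0) = PySem.List.enumerate sel ((0 : Nat) : Int) from by rw [h0],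
    cut_eq sel 0, show (0 : Int) = ((0 : Nat) : Int) from h0.symm]
  simpa using foldB_eq sel (cutN sel 0) 0 []

theorem alt_eq_grF (sel : List Ev) :
    group_events_by_tabchange_session_alt sel = grF sel := by
  induction sel with
  | nil => rw [alt_eq_runB]; simp [cutN, runB, grF]
  | cons e t ih =>
    rw [alt_eq_runB] at ih ⊢
    by_cases h : tabB e
    · have hcut : cutN (e :: t) 0 = 1 :: (cutN t 0).map (· + 1) := by
        simp [cutN, h, cutN_shift t 0]
      have hs : runB (e :: t) ((cutN t 0).map (· + 1)) 1 = runB t (cutN t 0) 0 := by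
        simpa using runB_shift e t (cutN t 0) 0
      rw [hcut]
      simp only [runB, Nat.sub_zero, List.drop_zero, List.take_succ_cons, List.take_zero]
      rw [hs, ih]
      simp [grF, h]
    · have hcut : cutN (e :: t) 0 = (cutN t 0).map (· + 1) := by
        simp [cutN, h, cutN_shift t 0]
      rw [hcut]
      cases hct : cutN t 0 with
      | nil =>
        rw [hct] at ih
        cases t with
        | nil => simp [runB, grF]
        | cons x xs =>
          have hx : grF (x :: xs) = [x :: xs] := by simpa [runB] using ih.symm
          show runB (e :: x :: xs) [] 0 = grF (e :: x :: xs)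
          rw [show grF (e :: x :: xs) = (match grF (x :: xs) with
              | [] => [[e]] | g :: gs => (e :: g) :: gs) from by simp [grF, h], hx]
          simp [runB]
      | cons c cs =>
        rw [hct] at ih
        have hs : runB (e :: t) (cs.map (· + 1)) (c + 1) = runB t cs c := runB_shift e t cs c
        simp only [List.map_cons, runB, Nat.sub_zero, List.drop_zero, List.take_succ_cons] at ih ⊢
        rw [hs]
        simp [grF, h, ← ih]

def prependG (inner : List Ev) : List (List Ev) → List (List Ev)
  | [] => if inner.isEmpty then [] else [inner]
  | g :: gs => (inner ++ g) :: gs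

theorem prependG_nil (gl : List (List Ev)) : prependG [] gl = gl := by
  cases gl <;> simp [prependG]

theorem foldA_eq (l : List Ev) (acc : List (List Ev)) (inner : List Ev) :
    finA (l.foldl stepA (acc, inner)) = acc ++ prependG inner (grF l) := by
  induction l generalizing acc inner with
  | nil =>
    simp only [List.foldl_nil, grF, prependG, finA]
    by_cases h : inner = []
    · subst h; simp
    · rw [if_pos (by cases inner <;> simp_all), if_neg (by simp [h])]
  | cons e t ih =>
    simp only [List.foldl_cons, stepA]
    by_cases h : (List.lookup "evt" e == some "tabchange") = true
    · rw [if_pos h, ih (acc ++ [inner ++ [e]]) [], prependG_nil]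
      simp only [grF, tabB, h, if_pos, prependG]
      simp
    · rw [if_neg h, ih acc (inner ++ [e])]
      simp only [grF, tabB, h]
      cases hg : grF t with
      | nil => simp [prependG]
      | cons g gs => simp [prependG]

theorem a_eq_grF (sel : List Ev) :
    group_events_by_tabchange_session sel = grF sel := by
  show finA (sel.foldl stepA ([], [])) = grF sel
  rw [foldA_eq sel [] [], prependG_nil]
  simp

-- ===== VERDICT (by name: the statement is the Claim_ definition above) =====
theorem group_events_by_tabchange_session_spec : Claim_equal_group_events_by_tabchange_session := by
  intro sel _ _
  unfold Spec_group_events_by_tabchange_session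
  rw [a_eq_grF, alt_eq_grF]
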